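-- pv_equiv track=rewrite | github.com/Berkeley-CS61B/BSAG | bsag/utils/java.py | class_matches
-- ===== SOURCE A (Python) =====
-- def class_matches(pat: str, cl: str) -> bool:
--     """Checks if the pattern `pat` matches the fully qualified Java class `cl`.
--
--     For class `java.lang.System`, patterns that match include: `java.lang.System`,
--     `java.lang.*`, `java.**`, `*.*.*`. Patterns that do not match include
--     `java.lang.Other`, `java.*`, `*`.
--
--     Args:
--         pat (str): pattern (may contain `*`, `**`, which act similarly to globs)
--         cl (str): fully qualified Java class
--
--     Returns:
--         bool: if pattern matches class
--     """
--
--     pat_chunks = pat.strip().split(".")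
--     cl_chunks = cl.strip().split(".")
--
--     for pat_chunk, cl_chunk in zip(pat_chunks, cl_chunks):
--         if pat_chunk == cl_chunk or pat_chunk == "*":
--             continue
--         if pat_chunk == "**":
--             return True
--         return False
--
--     return len(pat_chunks) == len(cl_chunks)
-- ===== SOURCE B (Python) =====
-- def class_matches(pat: str, cl: str) -> bool:
--     def go(ps, cs):
--         if not ps or not cs:
--             return len(ps) == len(cs)
--         if ps[0] == cs[0] or ps[0] == "*":
--             return go(ps[1:], cs[1:])
--         return ps[0] == "**"
--     return go(pat.strip().split("."), cl.strip().split("."))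
-- ===== Notes on version B (the rewrite author's own statement) =====
-- stated objective: simpler
-- what changed: Replaced the zip-loop with early returns plus a separate trailing length check by a single structural recursion over the two chunk lists in which the length condition is the base case.
import Mathlib
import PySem

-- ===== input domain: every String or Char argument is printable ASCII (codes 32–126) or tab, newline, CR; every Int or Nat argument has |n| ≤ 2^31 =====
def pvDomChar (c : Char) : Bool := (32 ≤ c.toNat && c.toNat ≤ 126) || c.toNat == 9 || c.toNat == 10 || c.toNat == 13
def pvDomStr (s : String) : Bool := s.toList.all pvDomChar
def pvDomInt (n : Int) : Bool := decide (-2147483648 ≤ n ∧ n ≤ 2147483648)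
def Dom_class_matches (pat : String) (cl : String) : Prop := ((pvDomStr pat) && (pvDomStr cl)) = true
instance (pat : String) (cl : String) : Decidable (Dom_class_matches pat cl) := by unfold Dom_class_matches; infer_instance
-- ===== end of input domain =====

-- B replaces A's zip-loop-with-early-returns plus trailing length check by one structural
-- recursion over the two chunk lists (objective: simpler); same return value everywhere.

-- ===== PORT A =====
-- the 'for pat_chunk, cl_chunk in zip(...)' loop; some b = an early 'return b', none = loop fell through
def classMatchesLoopA : List (String × String) → Option Bool
  | [] => none
  | (p, c) :: rest =>
    if p = c ∨ p = "*" then classMatchesLoopA rest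
    else if p = "**" then some true
    else some false

def class_matches (pat : String) (cl : String) : Bool :=
  let pat_chunks := (PySem.Str.split? (PySem.Str.strip pat) ".").getD []
  let cl_chunks := (PySem.Str.split? (PySem.Str.strip cl) ".").getD []
  match classMatchesLoopA (List.zip pat_chunks cl_chunks) with
  | some b => b
  | none => decide (List.length pat_chunks = List.length cl_chunks)

-- ===== PORT B =====
-- Source B's recursive helper 'go' (structural recursion; base case = the length check)
def classMatchesGoB : List String → List String → Bool
  | [], cs => decide (([] : List String).length = cs.length)
  | _ :: _, [] => false
  | p :: ps, c :: cs =>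
    if p = c ∨ p = "*" then classMatchesGoB ps cs
    else decide (p = "**")

def class_matches_alt (pat : String) (cl : String) : Bool :=
  classMatchesGoB ((PySem.Str.split? (PySem.Str.strip pat) ".").getD [])
                  ((PySem.Str.split? (PySem.Str.strip cl) ".").getD [])

-- ===== PRECONDITION & SPEC =====
def Spec_class_matches (pat : String) (cl : String) (out : Bool) : Prop := out = class_matches_alt pat cl
instance (pat : String) (cl : String) (out : Bool) : Decidable (Spec_class_matches pat cl out) := by unfold Spec_class_matches; infer_instance

-- ===== CLAIM (what is proved, stated in full; the proofs are below) =====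
def Claim_equal_class_matches : Prop := ∀ (pat : String) (cl : String), Dom_class_matches pat cl → Spec_class_matches pat cl (class_matches pat cl)

-- ===== LEMMAS AND PROOFS =====
theorem loopA_eq_goB (ps cs : List String) :
    (match classMatchesLoopA (ps.zip cs) with
     | some b => b
     | none => decide (ps.length = cs.length)) = classMatchesGoB ps cs := by
  induction ps generalizing cs with
  | nil => cases cs <;> simp [classMatchesLoopA, classMatchesGoB]
  | cons p ps ih =>
    cases cs with
    | nil => simp [classMatchesLoopA, classMatchesGoB]
    | cons c cs =>
      by_cases h : p = c ∨ p = "*"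
      · simp only [classMatchesLoopA, classMatchesGoB, List.zip_cons_cons, if_pos h]
        simpa using ih cs
      · simp only [classMatchesLoopA, classMatchesGoB, List.zip_cons_cons, if_neg h]
        by_cases h2 : p = "**" <;> simp [h2]

-- ===== VERDICT (by name: the statement is the Claim_ definition above) =====
theorem class_matches_spec : Claim_equal_class_matches := by
  intro pat cl _
  unfold Spec_class_matches class_matches class_matches_alt
  exact loopA_eq_goB ((PySem.Str.split? (PySem.Str.strip pat) ".").getD [])
    ((PySem.Str.split? (PySem.Str.strip cl) ".").getD [])
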